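-- pv_equiv track=rewrite | github.com/neelchandragit/GuessTheWord | utils/hint_utils.py | get_possible_matches
-- ===== SOURCE A (Python) =====
-- from typing import Iterable, List
--
-- def get_possible_matches(raw_hint: str, word_pool: List[str]) -> List[str]:
--     """
--     Returns words that match the hint exactly (length, letters, spaces).
--     """
--     L = len(raw_hint)
--     matches: List[str] = []
--     for w in word_pool:
--         if len(w) != L:
--             continue
--         ok = True
--         for i, hc in enumerate(raw_hint):
--             wc = w[i]
--             if hc == '_':
--                 if wc == ' ':  # hidden char can't be a space
--                     ok = False
--                     break
--             elif hc == ' ':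
--                 if wc != ' ':
--                     ok = False
--                     break
--             else:
--                 if hc.lower() != wc.lower():
--                     ok = False
--                     break
--         if ok:
--             matches.append(w)
--     return matches
-- ===== SOURCE B (Python) =====
-- from typing import List
--
-- def get_possible_matches(raw_hint: str, word_pool: List[str]) -> List[str]:
--     # Position-major staged filtering: keep right-length words, then narrow
--     # the candidate list one hint position at a time.
--     L = len(raw_hint)
--     candidates = [w for w in word_pool if len(w) == L]
--     for i, hc in enumerate(raw_hint):
--         if hc == '_':
--             candidates = [w for w in candidates if w[i] != ' ']
--         elif hc == ' ':
--             candidates = [w for w in candidates if w[i] == ' ']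
--         else:
--             lc = hc.lower()
--             candidates = [w for w in candidates if w[i].lower() == lc]
--     return candidates
-- ===== Notes on version B (the rewrite author's own statement) =====
-- stated objective: alternative
-- what changed: B inverts the loop nesting: instead of A's word-major scan (test each word against every hint position with a break flag), B first keeps the right-length words and then makes one filtering pass over the whole candidate list per hint position, narrowing it stage by stage; correct because list order is preserved by each filter and a word survives all stages iff it passes every per-position test.
import Mathlib
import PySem

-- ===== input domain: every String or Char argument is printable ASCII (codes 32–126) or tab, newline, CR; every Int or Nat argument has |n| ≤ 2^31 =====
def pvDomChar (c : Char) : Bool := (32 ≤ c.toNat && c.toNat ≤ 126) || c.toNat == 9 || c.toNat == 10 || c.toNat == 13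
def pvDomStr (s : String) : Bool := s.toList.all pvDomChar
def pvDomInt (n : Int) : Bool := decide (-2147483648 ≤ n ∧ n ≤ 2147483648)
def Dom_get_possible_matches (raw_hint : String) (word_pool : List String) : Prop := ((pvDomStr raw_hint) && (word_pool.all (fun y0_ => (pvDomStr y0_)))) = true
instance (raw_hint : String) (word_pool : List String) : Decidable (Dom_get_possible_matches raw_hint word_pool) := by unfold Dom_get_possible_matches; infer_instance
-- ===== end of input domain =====

-- B inverts the loop nesting of A: it keeps the right-length words and then narrows the
-- candidate list with one filtering pass per hint position (alternative decomposition;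
-- return value only, no mutation).


-- ===== PORT A =====
-- inner 'for i, hc in enumerate(raw_hint)' loop with break; wc = w[i] (always in
-- range when reached, since A only calls this after len(w) == len(raw_hint))
def pvCheckA (w : List Char) : List (Int × Char) → Bool
  | [] => true
  | (i, hc) :: rest =>
    match PySem.List.pyGet? w i with
    | none => false   -- unreachable under A's length guard
    | some wc =>
      if hc == '_' then (if wc == ' ' then false else pvCheckA w rest)
      else if hc == ' ' then (if wc != ' ' then false else pvCheckA w rest)
      else if PySem.Chars.lowerChar hc != PySem.Chars.lowerChar wc then false
      else pvCheckA w rest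

def get_possible_matches (raw_hint : String) (word_pool : List String) : List String :=
  let L := PySem.Str.len raw_hint
  word_pool.foldl (fun acc w =>
    if PySem.Str.len w != L then acc
    else if pvCheckA w.toList (PySem.List.enumerate raw_hint.toList 0) then acc ++ [w]
    else acc) []

-- ===== PORT B =====
-- one staged filtering pass of B: the chosen comprehension for hint char hc at position i
-- (w[i] is in range for every candidate, since all candidates have the hint's length)
def pvStageB (cs : List String) (i : Int) (hc : Char) : List String :=
  if hc == '_' then
    cs.filter (fun w => match PySem.List.pyGet? w.toList i with
      | some wc => wc != ' ' | none => false)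
  else if hc == ' ' then
    cs.filter (fun w => match PySem.List.pyGet? w.toList i with
      | some wc => wc == ' ' | none => false)
  else
    let lc := PySem.Chars.lowerChar hc
    cs.filter (fun w => match PySem.List.pyGet? w.toList i with
      | some wc => PySem.Chars.lowerChar wc == lc | none => false)

def get_possible_matches_alt (raw_hint : String) (word_pool : List String) : List String :=
  let L := PySem.Str.len raw_hint
  let candidates := word_pool.filter (fun w => PySem.Str.len w == L)
  (PySem.List.enumerate raw_hint.toList 0).foldl
    (fun cs p => pvStageB cs p.1 p.2) candidates

-- ===== PRECONDITION & SPEC =====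
def Spec_get_possible_matches (raw_hint : String) (word_pool : List String) (out : List String) : Prop := out = get_possible_matches_alt raw_hint word_pool
instance (raw_hint : String) (word_pool : List String) (out : List String) : Decidable (Spec_get_possible_matches raw_hint word_pool out) := by unfold Spec_get_possible_matches; infer_instance

-- ===== CLAIM (what is proved, stated in full; the proofs are below) =====
def Claim_equal_get_possible_matches : Prop := ∀ (raw_hint : String) (word_pool : List String), Dom_get_possible_matches raw_hint word_pool → Spec_get_possible_matches raw_hint word_pool (get_possible_matches raw_hint word_pool)

-- ===== LEMMAS AND PROOFS =====

-- the per-position test shared by both characterizations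
def pvPred (i : Int) (hc : Char) (w : String) : Bool :=
  match PySem.List.pyGet? w.toList i with
  | none => false
  | some wc =>
    if hc == '_' then wc != ' '
    else if hc == ' ' then wc == ' '
    else PySem.Chars.lowerChar wc == PySem.Chars.lowerChar hc

-- one B stage is a filter by pvPred
theorem pvStageB_eq (cs : List String) (i : Int) (hc : Char) :
    pvStageB cs i hc = cs.filter (pvPred i hc) := by
  unfold pvStageB pvPred
  split_ifs with h1 h2 <;>
    refine List.filter_congr (fun w _ => ?_) <;>
    cases PySem.List.pyGet? w.toList i <;> simp_all

-- A's inner break loop is the conjunction of the per-position tests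
theorem pvCheckA_eq_all (w : String) : ∀ (l : List (Int × Char)),
    pvCheckA w.toList l = l.all (fun p => pvPred p.1 p.2 w) := by
  intro l
  induction l with
  | nil => simp [pvCheckA]
  | cons p rest ih =>
    obtain ⟨i, hc⟩ := p
    simp only [pvCheckA, List.all_cons, pvPred, ih]
    cases PySem.List.pyGet? w.toList i with
    | none => simp
    | some wc =>
      by_cases h1 : hc = '_'
      · by_cases h2 : wc = ' ' <;> simp [h1, h2]
      · by_cases h2 : hc = ' '
        · by_cases h3 : wc = ' ' <;> simp [h2, h3]
        · by_cases h3 : PySem.Chars.lowerChar hc = PySem.Chars.lowerChar wc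
          · simp [h1, h2, h3]
          · simp [h1, h2, h3, Ne.symm h3]

-- staged filtering collapses to a single filter by the conjunction of the stage tests
theorem pvFold_filter_eq (f : Int × Char → String → Bool) :
    ∀ (l : List (Int × Char)) (cs : List String),
      l.foldl (fun cs p => cs.filter (f p)) cs
        = cs.filter (fun w => l.all (fun p => f p w)) := by
  intro l
  induction l with
  | nil => intro cs; simp
  | cons p rest ih =>
    intro cs
    rw [List.foldl_cons, ih, List.filter_filter]
    exact List.filter_congr (fun w _ => by rw [Bool.and_comm, List.all_cons])

-- A's accumulator loop builds the single filter directly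
theorem pvA_foldl (raw_hint : String) : ∀ (pool acc : List String),
    pool.foldl (fun acc w =>
      if PySem.Str.len w != PySem.Str.len raw_hint then acc
      else if pvCheckA w.toList (PySem.List.enumerate raw_hint.toList 0) then acc ++ [w]
      else acc) acc
    = acc ++ pool.filter (fun w =>
        (PySem.Str.len w == PySem.Str.len raw_hint)
          && (PySem.List.enumerate raw_hint.toList 0).all (fun p => pvPred p.1 p.2 w)) := by
  intro pool
  induction pool with
  | nil => intro acc; simp
  | cons w rest ih =>
    intro acc
    rw [List.foldl_cons, List.filter_cons]
    by_cases h1 : w.length = raw_hint.length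
    · by_cases h2 : pvCheckA w.toList (PySem.List.enumerate raw_hint.toList 0) = true
      · have hinit : (if (PySem.Str.len w != PySem.Str.len raw_hint) = true then acc
            else if pvCheckA w.toList (PySem.List.enumerate raw_hint.toList 0) = true
              then acc ++ [w] else acc) = acc ++ [w] := by simp [h1, h2]
        have hk : (PySem.Str.len w == PySem.Str.len raw_hint
            && (PySem.List.enumerate raw_hint.toList 0).all (fun p => pvPred p.1 p.2 w)) = true := by
          simp [h1, ← pvCheckA_eq_all, h2]
        rw [hinit, ih, if_pos hk]; simp
      · have hinit : (if (PySem.Str.len w != PySem.Str.len raw_hint) = true then acc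
            else if pvCheckA w.toList (PySem.List.enumerate raw_hint.toList 0) = true
              then acc ++ [w] else acc) = acc := by simp [h1, h2]
        have hk : ¬ (PySem.Str.len w == PySem.Str.len raw_hint
            && (PySem.List.enumerate raw_hint.toList 0).all (fun p => pvPred p.1 p.2 w)) = true := by
          simp [h1, ← pvCheckA_eq_all, h2]
        rw [hinit, ih, if_neg hk]
    · have hinit : (if (PySem.Str.len w != PySem.Str.len raw_hint) = true then acc
          else if pvCheckA w.toList (PySem.List.enumerate raw_hint.toList 0) = true
            then acc ++ [w] else acc) = acc := by simp [h1]
      have hk : ¬ (PySem.Str.len w == PySem.Str.len raw_hint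
          && (PySem.List.enumerate raw_hint.toList 0).all (fun p => pvPred p.1 p.2 w)) = true := by
        simp [h1]
      rw [hinit, ih, if_neg hk]

-- ===== VERDICT (by name: the statement is the Claim_ definition above) =====
theorem get_possible_matches_spec : Claim_equal_get_possible_matches := by
  intro raw_hint word_pool _
  show get_possible_matches raw_hint word_pool = get_possible_matches_alt raw_hint word_pool
  unfold get_possible_matches get_possible_matches_alt
  have hstage : ∀ (l : List (Int × Char)) (cs : List String),
      l.foldl (fun cs p => pvStageB cs p.1 p.2) cs
        = l.foldl (fun cs p => cs.filter (pvPred p.1 p.2)) cs := by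
    intro l
    induction l with
    | nil => intro cs; rfl
    | cons p rest ih => intro cs; rw [List.foldl_cons, List.foldl_cons, pvStageB_eq, ih]
  rw [hstage, pvFold_filter_eq (fun p w => pvPred p.1 p.2 w), List.filter_filter,
    pvA_foldl raw_hint word_pool [], List.nil_append]
  exact List.filter_congr (fun w _ => Bool.and_comm _ _)
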